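-- pv_equiv track=rewrite | github.com/LazareLive/AutomatedDices | Dice_Script.py | recursiveDiceNumberSequence
-- ===== SOURCE A (Python) =====
-- import math, os
--
-- def isEven(n):
--     return ((n % 2) == 0)
--
-- def recursiveDiceNumberSequence(order):
--     #There are several "notable" sequences that we will use for the dice number sequence. They are called triad,
--     #tetrad and pentad. As order cannot be less than 3, we will only use these sequences to generate any dice.
--     #The goal will be to divide the number of faces until we can find a sequence. These sequences are generated by
--     #using various calculations on the classic dices.
--     #Tetrad case - Taken on the D3 and D6 dequences
--     if(order == 3):
--         return [3, 1, 2]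
--     #Tetrad case - Taken on the D8 sequence
--     elif(order == 4):
--         return [4, 1, 3, 2]
--     #Pentad case - Taken on the D10 sequence -- to be checked. This does not feel right
--     elif(order == 5):
--         return [5, 1, 4, 2, 3]
--     #For any other cases : use recursion until we find a n-ad sequence
--     newOrder = math.trunc(order / 2)
--     recursiveSequence = recursiveDiceNumberSequence(newOrder)
--     #As the recursiveSequence will send half of the information, creation of a new array
--     numberSequence = [0] * order
--     if(isEven(order)):
--         #On the case of an even order dice, check witch method to use based on the last recursion sequence
--         for i in range(newOrder):
--                 #Generate the even-numbers on one polar side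
--                 numberSequence[i] = recursiveSequence[i] * 2
--                 #Generate the odd_numbers on the other side
--                 if(isEven(newOrder)):
--                     #On the even-even case, the last sequence is repeated to generate the current order
--                     numberSequence[newOrder + i] = numberSequence[i] - 1
--                 else:
--                     #On the even-odd case, the last sequence must be inverted to have a weak-strong alternance
--                     numberSequence[newOrder + i] = ((newOrder - recursiveSequence[i] + 1) * 2) - 1
--     else:
--         #On the case of an odd dice order, generate the dice following these rules
--         #Placement of the first number
--         numberSequence[0] = order
--         #Placement of the recursive sequence
--         for i in range(newOrder):
--             #Generation of the even numbers on a polar side of the order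
--             numberSequence[i + 1] = recursiveSequence[newOrder - i - 1] * 2
--             #Generation of the odd numbers
--             numberSequence[order - (i + 1)] = order - numberSequence[i + 1]
--     #Return the number sequence at the end
--     return numberSequence
-- ===== SOURCE B (Python) =====
-- def recursiveDiceNumberSequence(order):
--     base = {3: [3, 1, 2], 4: [4, 1, 3, 2], 5: [5, 1, 4, 2, 3]}
--     # Push the chain of orders obtained by repeated halving, then rebuild bottom-up.
--     orders = []
--     o = order
--     while o not in base:
--         orders.append(o)
--         o = o // 2  # equal to math.trunc(o / 2) for the positive orders reached here
--     seq = base[o]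
--     for o in reversed(orders):
--         h = o // 2
--         if o % 2 == 0:
--             if h % 2 == 0:
--                 seq = [x * 2 for x in seq] + [x * 2 - 1 for x in seq]
--             else:
--                 seq = [x * 2 for x in seq] + [(h - x + 1) * 2 - 1 for x in seq]
--         else:
--             seq = [o] + [x * 2 for x in reversed(seq)] + [o - x * 2 for x in seq]
--     return seq
-- ===== Notes on version B (the rewrite author's own statement) =====
-- stated objective: alternative
-- what changed: Replaces A's top-down recursion that fills a preallocated zero array index by index with an iterative bottom-up rebuild: push the halving chain of orders, then fold back up building each level by list comprehensions/concatenation.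
import Mathlib
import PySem

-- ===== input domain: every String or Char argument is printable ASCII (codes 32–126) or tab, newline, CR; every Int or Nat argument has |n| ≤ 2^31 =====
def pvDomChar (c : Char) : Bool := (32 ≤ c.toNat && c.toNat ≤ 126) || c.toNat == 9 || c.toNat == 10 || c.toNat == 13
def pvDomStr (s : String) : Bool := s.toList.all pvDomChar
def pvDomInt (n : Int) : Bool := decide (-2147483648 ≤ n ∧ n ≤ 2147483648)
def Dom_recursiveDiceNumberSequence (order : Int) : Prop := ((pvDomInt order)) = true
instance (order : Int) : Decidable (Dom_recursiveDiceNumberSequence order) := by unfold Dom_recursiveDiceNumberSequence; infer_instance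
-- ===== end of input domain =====

-- B rebuilds the sequence iteratively bottom-up (halving chain + list comprehensions) instead of A's
-- top-down recursion with index-by-index assignment into a preallocated array; objective: alternative.

-- ===== PORT A =====
-- Literal port of A. math.trunc(order / 2) equals order / 2 (Int) on the positive orders reached
-- under Pre_ (|order| ≤ 2^31 keeps the float division exact). The `order ≤ 2` branch only makes the
-- recursion total: Python raises RecursionError there, and Pre_ excludes those inputs.
def recursiveDiceNumberSequence (order : Int) : List Int :=
  if order = 3 then [3, 1, 2]
  else if order = 4 then [4, 1, 3, 2]
  else if order = 5 then [5, 1, 4, 2, 3]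
  else if order ≤ 2 then []
  else
    let newOrder := order / 2
    let rs := recursiveDiceNumberSequence newOrder
    let ns := List.replicate order.toNat (0 : Int)
    if order % 2 = 0 then
      (List.range newOrder.toNat).foldl (fun ns i =>
        let v := rs.getD i 0 * 2
        let ns := ns.set i v
        if newOrder % 2 = 0 then ns.set (newOrder.toNat + i) (v - 1)
        else ns.set (newOrder.toNat + i) ((newOrder - rs.getD i 0 + 1) * 2 - 1)) ns
    else
      let ns := ns.set 0 order
      (List.range newOrder.toNat).foldl (fun ns i =>
        let v := rs.getD (newOrder.toNat - i - 1) 0 * 2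
        let ns := ns.set (i + 1) v
        ns.set (order.toNat - (i + 1)) (order - v)) ns
termination_by order.toNat
decreasing_by omega

-- ===== PORT B =====
-- The chain of orders pushed by Source B's while-loop (in push order); the `o ≤ 2` disjunct only makes
-- the loop total in Lean (Python B never terminates there; those inputs are outside Pre_).
def altChain (o : Int) : List Int :=
  if o = 3 ∨ o = 4 ∨ o = 5 ∨ o ≤ 2 then [] else o :: altChain (o / 2)
termination_by o.toNat
decreasing_by omega

-- The final value of Source B's loop variable `o` when the while-loop exits.
def altFinal (o : Int) : Int :=
  if o = 3 ∨ o = 4 ∨ o = 5 ∨ o ≤ 2 then o else altFinal (o / 2)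
termination_by o.toNat
decreasing_by omega

-- base[o] of Source B
def altBase (o : Int) : List Int :=
  if o = 3 then [3, 1, 2] else if o = 4 then [4, 1, 3, 2]
  else if o = 5 then [5, 1, 4, 2, 3] else []

-- one iteration of Source B's bottom-up for-loop
def altStep (seq : List Int) (o : Int) : List Int :=
  let h := o / 2
  if o % 2 = 0 then
    if h % 2 = 0 then seq.map (fun x => x * 2) ++ seq.map (fun x => x * 2 - 1)
    else seq.map (fun x => x * 2) ++ seq.map (fun x => (h - x + 1) * 2 - 1)
  else o :: (seq.reverse.map (fun x => x * 2) ++ seq.map (fun x => o - x * 2))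

def recursiveDiceNumberSequence_alt (order : Int) : List Int :=
  ((altChain order).reverse).foldl altStep (altBase (altFinal order))

-- ===== PRECONDITION & SPEC =====
-- Pre_ excludes order < 3, where Python A hits the recursion limit (RecursionError) and never returns.
def Pre_recursiveDiceNumberSequence (order : Int) : Prop := 3 ≤ order
instance (order : Int) : Decidable (Pre_recursiveDiceNumberSequence order) := by unfold Pre_recursiveDiceNumberSequence; infer_instance
def pvWitness_recursiveDiceNumberSequence : Int := (7)

def Spec_recursiveDiceNumberSequence (order : Int) (out : List Int) : Prop := out = recursiveDiceNumberSequence_alt order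
instance (order : Int) (out : List Int) : Decidable (Spec_recursiveDiceNumberSequence order out) := by unfold Spec_recursiveDiceNumberSequence; infer_instance

-- ===== CLAIM (what is proved, stated in full; the proofs are below) =====
def Claim_equal_recursiveDiceNumberSequence : Prop := ∀ (order : Int), Dom_recursiveDiceNumberSequence order → Pre_recursiveDiceNumberSequence order → Spec_recursiveDiceNumberSequence order (recursiveDiceNumberSequence order)

-- ===== LEMMAS AND PROOFS =====

theorem alt_unfold (o : Int) (h6 : 6 ≤ o) :
    recursiveDiceNumberSequence_alt o = altStep (recursiveDiceNumberSequence_alt (o / 2)) o := by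
  unfold recursiveDiceNumberSequence_alt
  rw [altChain, if_neg (by omega), altFinal, if_neg (by omega)]
  simp [List.foldl_append]


theorem altStep_length (seq : List Int) (o : Int) :
    (altStep seq o).length = 2 * seq.length + (if o % 2 = 0 then 0 else 1) := by
  simp only [altStep]
  split_ifs <;> simp <;> omega

theorem alt_base3 : recursiveDiceNumberSequence_alt 3 = [3, 1, 2] := by
  unfold recursiveDiceNumberSequence_alt
  rw [altChain, if_pos (by norm_num), altFinal, if_pos (by norm_num)]
  simp [altBase]

theorem alt_base4 : recursiveDiceNumberSequence_alt 4 = [4, 1, 3, 2] := by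
  unfold recursiveDiceNumberSequence_alt
  rw [altChain, if_pos (by norm_num), altFinal, if_pos (by norm_num)]
  simp [altBase]

theorem alt_base5 : recursiveDiceNumberSequence_alt 5 = [5, 1, 4, 2, 3] := by
  unfold recursiveDiceNumberSequence_alt
  rw [altChain, if_pos (by norm_num), altFinal, if_pos (by norm_num)]
  simp [altBase]

-- the even-order loop of A, characterised by induction on the number of iterations
theorem fold_even (f g : Nat → Int) (h k : Nat) (hk : k ≤ h) :
    (List.range k).foldl (fun ns i => (ns.set i (f i)).set (h + i) (g i))
      (List.replicate (2 * h) (0 : Int))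
    = (List.range k).map f ++ (List.replicate (h - k) 0 ++
        ((List.range k).map g ++ List.replicate (h - k) 0)) := by
  induction k with
  | zero =>
    simp only [List.range_zero, List.map_nil, List.foldl_nil, Nat.sub_zero, List.nil_append]
    rw [two_mul, List.replicate_add]
  | succ k ih =>
    rw [List.range_succ, List.foldl_append, ih (by omega)]
    simp only [List.foldl_cons, List.foldl_nil]
    obtain ⟨m, hm⟩ : ∃ m, h - k = m + 1 := ⟨h - k - 1, by omega⟩
    have hm' : h - (k + 1) = m := by omega
    rw [hm, hm', List.replicate_succ]
    rw [List.set_append_right k (f k) (by simp)]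
    simp only [List.length_map, List.length_range, Nat.sub_self]
    rw [List.cons_append, List.set_cons_zero]
    rw [List.set_append_right (h + k) (g k)
      (by simp only [List.length_map, List.length_range]; omega)]
    simp only [List.length_map, List.length_range]
    rw [show h + k - k = (m + k) + 1 from by omega, List.set_cons_succ]
    rw [List.set_append_right (m + k) (g k)
      (by simp only [List.length_replicate]; omega)]
    simp only [List.length_replicate]
    rw [show m + k - m = k from by omega]
    rw [List.set_append_right k (g k) (by simp)]
    simp only [List.length_map, List.length_range, Nat.sub_self]
    rw [List.set_cons_zero]
    simp [List.append_assoc]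

-- the odd-order loop of A
theorem fold_odd (f g : Nat → Int) (h : Nat) (c : Int) (k : Nat) (hk : k ≤ h) :
    (List.range k).foldl (fun ns i => (ns.set (i + 1) (f i)).set (2 * h + 1 - (i + 1)) (g i))
      ((List.replicate (2 * h + 1) (0 : Int)).set 0 c)
    = c :: ((List.range k).map f ++ (List.replicate (h - k) 0 ++
        (List.replicate (h - k) 0 ++ ((List.range k).map g).reverse))) := by
  induction k with
  | zero =>
    simp only [List.range_zero, List.map_nil, List.foldl_nil, Nat.sub_zero, List.nil_append,
      List.append_nil, List.reverse_nil]
    rw [List.replicate_succ, List.set_cons_zero, two_mul, List.replicate_add]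
  | succ k ih =>
    rw [List.range_succ, List.foldl_append, ih (by omega)]
    simp only [List.foldl_cons, List.foldl_nil]
    obtain ⟨m, hm⟩ : ∃ m, h - k = m + 1 := ⟨h - k - 1, by omega⟩
    have hm' : h - (k + 1) = m := by omega
    rw [hm, hm', List.replicate_succ]
    rw [List.set_cons_succ]
    rw [List.set_append_right k (f k) (by simp)]
    simp only [List.length_map, List.length_range, Nat.sub_self]
    rw [List.cons_append, List.set_cons_zero]
    rw [show 2 * h + 1 - (k + 1) = (2 * h - k - 1) + 1 from by omega, List.set_cons_succ]
    rw [List.set_append_right (2 * h - k - 1) (g k)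
      (by simp only [List.length_map, List.length_range]; omega)]
    simp only [List.length_map, List.length_range]
    rw [show 2 * h - k - 1 - k = (2 * m) + 1 from by omega, List.set_cons_succ]
    rw [List.set_append_right (2 * m) (g k)
      (by simp only [List.length_replicate]; omega)]
    simp only [List.length_replicate]
    rw [show 2 * m - m = m from by omega]
    rw [List.set_append_left m (g k) (by simp)]
    rw [show (0 : Int) :: List.replicate m 0 = List.replicate m (0 : Int) ++ [0] from by
      rw [← List.replicate_succ, List.replicate_succ']]
    rw [List.set_append_right m (g k) (by simp)]
    simp only [List.length_replicate, Nat.sub_self, List.set_cons_zero]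
    simp [List.append_assoc]

theorem evens_eq (seq : List Int) :
    (List.range seq.length).map (fun i => seq.getD i 0 * 2) = seq.map (fun x => x * 2) := by
  apply List.ext_getElem
  · simp
  · intro i h1 h2
    simp only [List.getElem_map, List.getElem_range]
    rw [List.getD_eq_getElem seq 0 (by simpa using h1)]

theorem odds1_eq (seq : List Int) :
    (List.range seq.length).map (fun i => seq.getD i 0 * 2 - 1) = seq.map (fun x => x * 2 - 1) := by
  apply List.ext_getElem
  · simp
  · intro i h1 h2
    simp only [List.getElem_map, List.getElem_range]
    rw [List.getD_eq_getElem seq 0 (by simpa using h1)]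

theorem odds2_eq (seq : List Int) (c : Int) :
    (List.range seq.length).map (fun i => (c - seq.getD i 0 + 1) * 2 - 1)
    = seq.map (fun x => (c - x + 1) * 2 - 1) := by
  apply List.ext_getElem
  · simp
  · intro i h1 h2
    simp only [List.getElem_map, List.getElem_range]
    rw [List.getD_eq_getElem seq 0 (by simpa using h1)]

theorem revmap_eq (seq : List Int) :
    (List.range seq.length).map (fun i => seq.getD (seq.length - i - 1) 0 * 2)
    = seq.reverse.map (fun x => x * 2) := by
  apply List.ext_getElem
  · simp
  · intro i h1 h2
    simp only [List.getElem_map, List.getElem_range, List.getElem_reverse]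
    have hlt : i < seq.length := by simpa using h1
    rw [List.getD_eq_getElem seq 0 (by omega)]
    have e : seq.length - i - 1 = seq.length - 1 - i := by omega
    simp [e]

theorem revmap2_eq (seq : List Int) (o : Int) :
    ((List.range seq.length).map (fun i => o - seq.getD (seq.length - i - 1) 0 * 2)).reverse
    = seq.map (fun x => o - x * 2) := by
  apply List.ext_getElem
  · simp
  · intro i h1 h2
    have hlt : i < seq.length := by simpa using h2
    simp only [List.getElem_reverse, List.length_map, List.length_range, List.getElem_map,
      List.getElem_range]
    rw [List.getD_eq_getElem seq 0 (by omega)]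
    have e : seq.length - (seq.length - 1 - i) - 1 = i := by omega
    simp [e]

theorem main_ind (n : Nat) : ∀ o : Int, o.toNat ≤ n → 3 ≤ o →
    recursiveDiceNumberSequence o = recursiveDiceNumberSequence_alt o ∧
    (recursiveDiceNumberSequence_alt o).length = o.toNat := by
  induction n with
  | zero => intro o hle h3; omega
  | succ n ih =>
    intro o hle h3
    by_cases e3 : o = 3
    · subst e3
      refine ⟨?_, by rw [alt_base3]; rfl⟩
      rw [recursiveDiceNumberSequence, alt_base3]; norm_num
    by_cases e4 : o = 4
    · subst e4
      refine ⟨?_, by rw [alt_base4]; rfl⟩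
      rw [recursiveDiceNumberSequence, alt_base4]; norm_num
    by_cases e5 : o = 5
    · subst e5
      refine ⟨?_, by rw [alt_base5]; rfl⟩
      rw [recursiveDiceNumberSequence, alt_base5]; norm_num
    have h6 : 6 ≤ o := by omega
    obtain ⟨hAB, hlen⟩ := ih (o / 2) (by omega) (by omega)
    have hlen' : (recursiveDiceNumberSequence_alt o).length = o.toNat := by
      rw [alt_unfold o h6, altStep_length, hlen]
      split_ifs <;> omega
    refine ⟨?_, hlen'⟩
    rw [recursiveDiceNumberSequence]
    rw [if_neg e3, if_neg e4, if_neg e5, if_neg (by omega : ¬ o ≤ 2)]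
    simp only [hAB]
    rw [alt_unfold o h6]
    set seq := recursiveDiceNumberSequence_alt (o / 2) with hseq
    by_cases he : o % 2 = 0
    · simp only [if_pos he]
      by_cases hh : o / 2 % 2 = 0
      · simp only [if_pos hh]
        rw [show o.toNat = 2 * (o / 2).toNat from by omega]
        rw [fold_even (fun i => seq.getD i 0 * 2) (fun i => seq.getD i 0 * 2 - 1)
          (o / 2).toNat (o / 2).toNat le_rfl]
        rw [← hlen, evens_eq, odds1_eq]
        simp [altStep, he, hh]
      · simp only [if_neg hh]
        rw [show o.toNat = 2 * (o / 2).toNat from by omega]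
        rw [fold_even (fun i => seq.getD i 0 * 2) (fun i => (o / 2 - seq.getD i 0 + 1) * 2 - 1)
          (o / 2).toNat (o / 2).toNat le_rfl]
        rw [← hlen, evens_eq, odds2_eq]
        simp [altStep, he, hh]
    · simp only [if_neg he]
      rw [show o.toNat = 2 * (o / 2).toNat + 1 from by omega]
      rw [fold_odd (fun i => seq.getD ((o / 2).toNat - i - 1) 0 * 2)
        (fun i => o - seq.getD ((o / 2).toNat - i - 1) 0 * 2)
        (o / 2).toNat o (o / 2).toNat le_rfl]
      rw [← hlen, revmap_eq, revmap2_eq]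
      simp [altStep, he]

-- ===== VERDICT (by name: the statement is the Claim_ definition above) =====
theorem recursiveDiceNumberSequence_spec : Claim_equal_recursiveDiceNumberSequence := by
  intro order _ hpre
  exact (main_ind order.toNat order le_rfl hpre).1
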